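-- pv_equiv track=rewrite | github.com/Vince2kLyleStyle/Heyanon-platform | api/app/services/signals.py | compute_regime
-- ===== SOURCE A (Python) =====
-- from typing import Dict, Optional, Any
--
-- def compute_regime(signals: Dict[str, Any]) -> str:
--     """Derive a simple aggregate regime from majority label bucket."""
--     counts = {
--         "Deep Accumulation": 0,
--         "Accumulation": 0,
--         "Neutral": 0,
--         "Distribution": 0,
--         "Safe Distribution": 0,
--     }
--     for s in signals.values():
--         lbl = s.get("label", "Neutral")
--         counts[lbl] = counts.get(lbl, 0) + 1
--     for k in ["Deep Accumulation", "Accumulation", "Neutral", "Distribution", "Safe Distribution"]: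
--         if counts.get(k, 0) > 0:
--             return k
--     return "Neutral"
-- ===== SOURCE B (Python) =====
-- def compute_regime(signals):
--     """Derive a simple aggregate regime from majority label bucket."""
--     order = ["Deep Accumulation", "Accumulation", "Neutral", "Distribution", "Safe Distribution"]
--     rank = {lbl: i for i, lbl in enumerate(order)}
--     best = len(order)
--     for s in signals.values():
--         r = rank.get(s.get("label", "Neutral"), len(order))
--         if r < best:
--             best = r
--     return order[best] if best < len(order) else "Neutral"
-- ===== Notes on version B (the rewrite author's own statement) =====
-- stated objective: simpler
-- what changed: Replaces the counts dict plus a second priority-scan pass with a single pass maintaining one running minimum priority rank, indexing the fixed order list at the end.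
import Mathlib
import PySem

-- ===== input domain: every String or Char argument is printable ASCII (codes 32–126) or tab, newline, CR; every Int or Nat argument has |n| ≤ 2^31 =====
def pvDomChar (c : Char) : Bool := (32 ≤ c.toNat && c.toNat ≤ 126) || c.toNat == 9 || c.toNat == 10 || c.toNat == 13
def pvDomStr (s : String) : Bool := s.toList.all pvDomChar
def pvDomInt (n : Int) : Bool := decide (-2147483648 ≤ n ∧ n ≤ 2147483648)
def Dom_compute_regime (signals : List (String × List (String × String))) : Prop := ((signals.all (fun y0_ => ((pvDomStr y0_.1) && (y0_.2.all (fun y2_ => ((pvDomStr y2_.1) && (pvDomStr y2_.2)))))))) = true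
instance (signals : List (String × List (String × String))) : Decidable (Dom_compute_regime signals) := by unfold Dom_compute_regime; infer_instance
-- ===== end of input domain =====

-- ===== PORT A =====
-- B replaces A's counts-dict build plus second priority-scan pass by a single pass keeping a
-- running minimum priority rank (objective: simpler); return values proved equal on all inputs.

-- helper: A's second loop — return the first priority label with a positive count, else "Neutral"
def pvScanOrder (counts : PySem.Dict String Int) : List String → String
  | [] => "Neutral"
  | k :: ks => if counts.getD k 0 > 0 then k else pvScanOrder counts ks

def compute_regime (signals : List (String × List (String × String))) : String :=
  let counts : PySem.Dict String Int := PySem.Dict.ofList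
    [("Deep Accumulation", 0), ("Accumulation", 0), ("Neutral", 0),
     ("Distribution", 0), ("Safe Distribution", 0)]
  let counts := (PySem.Dict.ofList signals).values.foldl
    (fun c s => c.modify ((PySem.Dict.ofList s).getD "label" "Neutral") 0 (· + 1)) counts
  pvScanOrder counts
    ["Deep Accumulation", "Accumulation", "Neutral", "Distribution", "Safe Distribution"]

-- ===== PORT B =====
def compute_regime_alt (signals : List (String × List (String × String))) : String :=
  let order : List String :=
    ["Deep Accumulation", "Accumulation", "Neutral", "Distribution", "Safe Distribution"]
  let rank : PySem.Dict String Int :=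
    PySem.Dict.ofList ((PySem.List.enumerate order).map (fun p => (p.2, p.1)))
  let best : Int := (PySem.Dict.ofList signals).values.foldl
    (fun b s =>
      let r := rank.getD ((PySem.Dict.ofList s).getD "label" "Neutral") (order.length : Int)
      if r < b then r else b) (order.length : Int)
  if best < (order.length : Int) then PySem.List.pyGetD order best "Neutral" else "Neutral"

-- ===== PRECONDITION & SPEC =====
def Spec_compute_regime (signals : List (String × List (String × String))) (out : String) : Prop := out = compute_regime_alt signals
instance (signals : List (String × List (String × String))) (out : String) : Decidable (Spec_compute_regime signals out) := by unfold Spec_compute_regime; infer_instance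

-- ===== CLAIM (what is proved, stated in full; the proofs are below) =====
def Claim_equal_compute_regime : Prop := ∀ (signals : List (String × List (String × String))), Dom_compute_regime signals → Spec_compute_regime signals (compute_regime signals)

-- ===== LEMMAS AND PROOFS =====
def pvRank (x : String) : Int :=
  if x = "Deep Accumulation" then 0 else if x = "Accumulation" then 1
  else if x = "Neutral" then 2 else if x = "Distribution" then 3
  else if x = "Safe Distribution" then 4 else 5

def pvBest (ls : List String) : Int :=
  if "Deep Accumulation" ∈ ls then 0 else if "Accumulation" ∈ ls then 1
  else if "Neutral" ∈ ls then 2 else if "Distribution" ∈ ls then 3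
  else if "Safe Distribution" ∈ ls then 4 else 5

lemma pvRank_getD (x : String) :
    (PySem.Dict.ofList ((PySem.List.enumerate
        ["Deep Accumulation", "Accumulation", "Neutral", "Distribution", "Safe Distribution"]).map
          (fun p => (p.2, p.1)))).getD x 5 = pvRank x := by
  by_cases h0 : x = "Deep Accumulation"
  · subst h0; decide
  by_cases h1 : x = "Accumulation"
  · subst h1; decide
  by_cases h2 : x = "Neutral"
  · subst h2; decide
  by_cases h3 : x = "Distribution"
  · subst h3; decide
  by_cases h4 : x = "Safe Distribution"
  · subst h4; decide
  have g0 : ("Deep Accumulation" == x) = false := by simp [beq_eq_false_iff_ne]; exact fun h => h0 h.symm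
  have g1 : ("Accumulation" == x) = false := by simp [beq_eq_false_iff_ne]; exact fun h => h1 h.symm
  have g2 : ("Neutral" == x) = false := by simp [beq_eq_false_iff_ne]; exact fun h => h2 h.symm
  have g3 : ("Distribution" == x) = false := by simp [beq_eq_false_iff_ne]; exact fun h => h3 h.symm
  have g4 : ("Safe Distribution" == x) = false := by simp [beq_eq_false_iff_ne]; exact fun h => h4 h.symm
  rw [show (PySem.Dict.ofList ((PySem.List.enumerate
        ["Deep Accumulation", "Accumulation", "Neutral", "Distribution", "Safe Distribution"]).map
          (fun p => (p.2, p.1)))) = PySem.Dict.mk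
      [("Deep Accumulation", 0), ("Accumulation", 1), ("Neutral", 2), ("Distribution", 3),
       ("Safe Distribution", 4)] from by decide]
  simp [PySem.Dict.getD_eq_get?_getD, PySem.Dict.get?_mk_cons, g0, g1, g2, g3, g4, pvRank,
    h0, h1, h2, h3, h4]
  rfl

lemma pvRank_getD' (x : String) :
    (PySem.Dict.ofList
        ([("Deep Accumulation", 0), ("Accumulation", 1), ("Neutral", 2),
          ("Distribution", 3), ("Safe Distribution", 4)] : List (String × Int))).getD x 5 =
      pvRank x := by
  rw [show (PySem.Dict.ofList
      ([("Deep Accumulation", 0), ("Accumulation", 1), ("Neutral", 2),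
        ("Distribution", 3), ("Safe Distribution", 4)] : List (String × Int))) =
    (PySem.Dict.ofList ((PySem.List.enumerate
        ["Deep Accumulation", "Accumulation", "Neutral", "Distribution", "Safe Distribution"]).map
          (fun p => (p.2, p.1)))) from by decide]
  exact pvRank_getD x

lemma pvRank_le_five (x : String) : pvRank x ≤ 5 := by
  unfold pvRank; split_ifs <;> omega

lemma pvBest_cons (x : String) (ls : List String) :
    pvBest (x :: ls) = min (pvRank x) (pvBest ls) := by
  simp only [pvBest, pvRank, List.mem_cons]
  by_cases h0 : x = "Deep Accumulation" <;> by_cases h1 : x = "Accumulation" <;>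
    by_cases h2 : x = "Neutral" <;> by_cases h3 : x = "Distribution" <;>
      by_cases h4 : x = "Safe Distribution" <;>
    simp_all [eq_comm] <;> split_ifs <;> omega

lemma pvFoldl_min (ls : List String) : ∀ b : Int, b ≤ 5 →
    ls.foldl (fun b x => if pvRank x < b then pvRank x else b) b = min b (pvBest ls) := by
  induction ls with
  | nil => intro b hb; simp [pvBest]; omega
  | cons x ls ih =>
    intro b hb
    simp only [List.foldl_cons, pvBest_cons]
    rw [ih _ (by have := pvRank_le_five x; split_ifs <;> omega)]
    have := pvRank_le_five x
    split_ifs <;> omega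

lemma pvCountsGetD (ls : List String) (k : String) :
    (ls.foldl (fun c x => c.modify x 0 (· + 1))
      (PySem.Dict.ofList
        ([("Deep Accumulation", 0), ("Accumulation", 0), ("Neutral", 0),
         ("Distribution", 0), ("Safe Distribution", 0)] : List (String × Int)))).getD k 0 =
    (PySem.Dict.ofList
        ([("Deep Accumulation", 0), ("Accumulation", 0), ("Neutral", 0),
         ("Distribution", 0), ("Safe Distribution", 0)] : List (String × Int))).getD k 0 +
      (ls.count k : Int) :=
  PySem.Dict.getD_foldl_modify_add_one ls _ k

lemma pvMain (ls : List String) :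
    pvScanOrder (ls.foldl (fun c x => c.modify x 0 (· + 1))
        (PySem.Dict.ofList
          ([("Deep Accumulation", 0), ("Accumulation", 0), ("Neutral", 0),
           ("Distribution", 0), ("Safe Distribution", 0)] : List (String × Int))))
      ["Deep Accumulation", "Accumulation", "Neutral", "Distribution", "Safe Distribution"] =
    (if pvBest ls < 5 then
        PySem.List.pyGetD
          ["Deep Accumulation", "Accumulation", "Neutral", "Distribution", "Safe Distribution"]
          (pvBest ls) "Neutral"
      else "Neutral") := by
  simp only [pvScanOrder]
  rw [pvCountsGetD ls "Deep Accumulation", pvCountsGetD ls "Accumulation",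
    pvCountsGetD ls "Neutral", pvCountsGetD ls "Distribution",
    pvCountsGetD ls "Safe Distribution"]
  rw [show (PySem.Dict.ofList
        ([("Deep Accumulation", 0), ("Accumulation", 0), ("Neutral", 0),
         ("Distribution", 0), ("Safe Distribution", 0)] : List (String × Int))).getD
        "Deep Accumulation" 0 = 0 from by decide,
    show (PySem.Dict.ofList
        ([("Deep Accumulation", 0), ("Accumulation", 0), ("Neutral", 0),
         ("Distribution", 0), ("Safe Distribution", 0)] : List (String × Int))).getD
        "Accumulation" 0 = 0 from by decide,
    show (PySem.Dict.ofList
        ([("Deep Accumulation", 0), ("Accumulation", 0), ("Neutral", 0),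
         ("Distribution", 0), ("Safe Distribution", 0)] : List (String × Int))).getD
        "Neutral" 0 = 0 from by decide,
    show (PySem.Dict.ofList
        ([("Deep Accumulation", 0), ("Accumulation", 0), ("Neutral", 0),
         ("Distribution", 0), ("Safe Distribution", 0)] : List (String × Int))).getD
        "Distribution" 0 = 0 from by decide,
    show (PySem.Dict.ofList
        ([("Deep Accumulation", 0), ("Accumulation", 0), ("Neutral", 0),
         ("Distribution", 0), ("Safe Distribution", 0)] : List (String × Int))).getD
        "Safe Distribution" 0 = 0 from by decide]
  simp only [zero_add, gt_iff_lt, Int.natCast_pos, List.count_pos_iff]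
  by_cases h0 : "Deep Accumulation" ∈ ls <;> by_cases h1 : "Accumulation" ∈ ls <;>
    by_cases h2 : "Neutral" ∈ ls <;> by_cases h3 : "Distribution" ∈ ls <;>
      by_cases h4 : "Safe Distribution" ∈ ls <;>
    simp_all [pvBest] <;> decide

-- ===== VERDICT (by name: the statement is the Claim_ definition above) =====
theorem compute_regime_spec : Claim_equal_compute_regime := by
  intro signals _
  unfold Spec_compute_regime compute_regime compute_regime_alt
  simp only [List.length_cons, List.length_nil, Nat.cast_ofNat, Nat.cast_succ]
  rw [show ((PySem.Dict.ofList signals).values.foldl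
      (fun (c : PySem.Dict String Int) s =>
        c.modify ((PySem.Dict.ofList s).getD "label" "Neutral") 0 (· + 1))
      (PySem.Dict.ofList
        ([("Deep Accumulation", 0), ("Accumulation", 0), ("Neutral", 0),
          ("Distribution", 0), ("Safe Distribution", 0)] : List (String × Int)))) =
      (((PySem.Dict.ofList signals).values.map
        (fun s => (PySem.Dict.ofList s).getD "label" "Neutral")).foldl
        (fun c x => c.modify x 0 (· + 1))
        (PySem.Dict.ofList
          ([("Deep Accumulation", 0), ("Accumulation", 0), ("Neutral", 0),
            ("Distribution", 0), ("Safe Distribution", 0)] : List (String × Int)))) from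
      (List.foldl_map (f := fun s => (PySem.Dict.ofList s).getD "label" "Neutral")
        (g := fun (c : PySem.Dict String Int) (x : String) => c.modify x 0 (· + 1))
        (l := (PySem.Dict.ofList signals).values)).symm ]
  rw [pvMain]
  norm_num
  have hb : ((PySem.Dict.ofList signals).values.foldl
      (fun (b : Int) s =>
        if (PySem.Dict.ofList
            ([("Deep Accumulation", 0), ("Accumulation", 1), ("Neutral", 2),
              ("Distribution", 3), ("Safe Distribution", 4)] : List (String × Int))).getD
            ((PySem.Dict.ofList s).getD "label" "Neutral") 5 < b then
          (PySem.Dict.ofList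
            ([("Deep Accumulation", 0), ("Accumulation", 1), ("Neutral", 2),
              ("Distribution", 3), ("Safe Distribution", 4)] : List (String × Int))).getD
            ((PySem.Dict.ofList s).getD "label" "Neutral") 5
        else b) 5) =
      pvBest ((PySem.Dict.ofList signals).values.map
        (fun s => (PySem.Dict.ofList s).getD "label" "Neutral")) := by
    rw [show (fun (b : Int) (s : List (String × String)) =>
        if (PySem.Dict.ofList
            ([("Deep Accumulation", 0), ("Accumulation", 1), ("Neutral", 2),
              ("Distribution", 3), ("Safe Distribution", 4)] : List (String × Int))).getD
            ((PySem.Dict.ofList s).getD "label" "Neutral") 5 < b then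
          (PySem.Dict.ofList
            ([("Deep Accumulation", 0), ("Accumulation", 1), ("Neutral", 2),
              ("Distribution", 3), ("Safe Distribution", 4)] : List (String × Int))).getD
            ((PySem.Dict.ofList s).getD "label" "Neutral") 5
        else b) =
        (fun b s => (fun (b : Int) (x : String) => if pvRank x < b then pvRank x else b) b
          ((PySem.Dict.ofList s).getD "label" "Neutral")) from by
      funext b s; simp only [pvRank_getD']]
    rw [← List.foldl_map (f := fun s => (PySem.Dict.ofList s).getD "label" "Neutral")
        (g := fun (b : Int) (x : String) => if pvRank x < b then pvRank x else b)]
    rw [pvFoldl_min _ 5 le_rfl]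
    have : pvBest ((PySem.Dict.ofList signals).values.map
        (fun s => (PySem.Dict.ofList s).getD "label" "Neutral")) ≤ 5 := by
      unfold pvBest; split_ifs <;> omega
    omega
  rw [hb]
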